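-- pv_equiv track=rewrite | github.com/sijapu17/Advent-of-Code | 2019/2019-04.py | nextNonDec
-- ===== SOURCE A (Python) =====
-- def nextNonDec(s): #Given a number (in string form), returns the next number with no decreasing digits (including the input number)
--     update=False
--     ret=s[0] #Output string
--     for d in range(1,len(s)):
--         if update:
--             ret+=newDigit
--         elif s[d]<s[d-1]:
--             update=True #Flag that this number needs to be increased
--             newDigit=s[d-1] #Set every digit after the decrease point to the digit before the decrease
--             ret+=newDigit
--         else:
--             ret+=s[d]
--     return(ret)
-- ===== SOURCE B (Python) =====
-- def nextNonDec(s):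
--     # Locate the first decrease, then build the answer in one shot:
--     # prefix up to it + the pre-decrease digit repeated to the end.
--     for i in range(1, len(s)):
--         if s[i] < s[i - 1]:
--             return s[:i] + s[i - 1] * (len(s) - i)
--     return s
-- ===== Notes on version B (the rewrite author's own statement) =====
-- stated objective: simpler
-- what changed: Replaces A's character-by-character accumulation with an update flag by locate-the-first-decrease then one closed-form construction via slicing and string multiplication (Pre_ excludes only the empty string, where A raises IndexError reading s[0]).
import Mathlib
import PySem

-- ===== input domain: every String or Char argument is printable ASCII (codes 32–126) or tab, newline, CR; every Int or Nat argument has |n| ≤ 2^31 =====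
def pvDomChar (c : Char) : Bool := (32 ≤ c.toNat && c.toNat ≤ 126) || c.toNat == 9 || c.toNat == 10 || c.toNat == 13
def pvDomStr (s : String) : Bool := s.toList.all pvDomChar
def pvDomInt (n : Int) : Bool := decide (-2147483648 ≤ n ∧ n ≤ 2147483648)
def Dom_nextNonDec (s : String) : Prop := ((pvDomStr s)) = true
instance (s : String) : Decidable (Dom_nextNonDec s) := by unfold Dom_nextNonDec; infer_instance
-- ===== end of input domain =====

-- B replaces A's flagged character-by-character accumulation with a locate-first-decrease
-- then closed-form slice+replicate construction; A raises IndexError on "" (excluded by Pre_).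


-- ===== PORT A =====
-- the for-loop: d runs over range(1, len(s)); state (update, newDigit, ret)
def nextNonDecLoop (cs : List Char) (d : Nat) (update : Bool) (newDigit : Char) (ret : List Char) : List Char :=
  if _h : d < cs.length then
    if update then
      nextNonDecLoop cs (d + 1) update newDigit (ret ++ [newDigit])
    else if cs.getD d ' ' < cs.getD (d - 1) ' ' then
      nextNonDecLoop cs (d + 1) true (cs.getD (d - 1) ' ') (ret ++ [cs.getD (d - 1) ' '])
    else
      nextNonDecLoop cs (d + 1) update newDigit (ret ++ [cs.getD d ' '])
  else ret
termination_by cs.length - d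

def nextNonDec (s : String) : String :=
  match s.toList with
  | [] => ""  -- Python A raises IndexError here (s[0]); excluded by Pre_nextNonDec
  | c0 :: _ => String.mk (nextNonDecLoop s.toList 1 false ' ' [c0])

-- ===== PORT B =====
-- scan for the first index i ≥ 1 with s[i] < s[i-1]
def firstDecIdx (prev : Char) (rest : List Char) (i : Nat) : Option Nat :=
  match rest with
  | [] => none
  | c :: t => if c < prev then some i else firstDecIdx c t (i + 1)

def nextNonDec_alt (s : String) : String :=
  match s.toList with
  | [] => s
  | c0 :: t =>
    match firstDecIdx c0 t 1 with
    | none => s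
    | some i =>
        String.mk (s.toList.take i ++ List.replicate (s.toList.length - i) (s.toList.getD (i - 1) ' '))

-- ===== PRECONDITION & SPEC =====
-- Pre_ excludes only the empty string, on which A raises IndexError reading s[0].
def Pre_nextNonDec (s : String) : Prop := s ≠ ""
instance (s : String) : Decidable (Pre_nextNonDec s) := by unfold Pre_nextNonDec; infer_instance
def pvWitness_nextNonDec : String := "1230"

def Spec_nextNonDec (s : String) (out : String) : Prop := out = nextNonDec_alt s
instance (s : String) (out : String) : Decidable (Spec_nextNonDec s out) := by unfold Spec_nextNonDec; infer_instance

-- ===== CLAIM =====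
def Claim_equal_nextNonDec : Prop := ∀ (s : String), Dom_nextNonDec s → Pre_nextNonDec s → Spec_nextNonDec s (nextNonDec s)

-- ===== LEMMAS AND PROOFS =====

-- Once update is set, A appends newDigit to the end of the string.
theorem loop_update_true (cs : List Char) (nd : Char) :
    ∀ d ret, nextNonDecLoop cs d true nd ret = ret ++ List.replicate (cs.length - d) nd := by
  intro d
  induction' h : cs.length - d with k ih generalizing d
  · intro ret
    rw [nextNonDecLoop]
    have : ¬ d < cs.length := by omega
    simp [this]
  · intro ret
    rw [nextNonDecLoop]
    have hd : d < cs.length := by omega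
    simp only [hd, dif_pos, if_pos]
    rw [ih (d + 1) (by omega)]
    simp [List.replicate_succ]

-- Main invariant: the not-yet-updated loop equals B's locate-then-construct result.
theorem loop_main (cs : List Char) (nd : Char) :
    ∀ (r : List Char) (d : Nat) (prev : Char),
      1 ≤ d → cs.drop d = r → cs.getD (d - 1) ' ' = prev →
      nextNonDecLoop cs d false nd (cs.take d) =
        (match firstDecIdx prev r d with
         | none => cs
         | some i => cs.take i ++ List.replicate (cs.length - i) (cs.getD (i - 1) ' ')) := by
  intro r
  induction r with
  | nil =>
      intro d prev h1 hdrop hprev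
      have hd : ¬ d < cs.length := by
        intro h
        have := List.drop_eq_nil_iff.mp hdrop
        omega
      rw [nextNonDecLoop]
      simp [hd, firstDecIdx, List.take_of_length_le (show cs.length ≤ d by omega)]
  | cons c r' ih =>
      intro d prev h1 hdrop hprev
      have hd : d < cs.length := by
        by_contra h
        have : cs.drop d = [] := List.drop_eq_nil_iff.mpr (by omega)
        rw [this] at hdrop; exact (List.cons_ne_nil _ _) hdrop.symm
      have h0 : cs[d]? = some c := by
        have := congrArg (fun l => l[0]?) hdrop
        simpa [List.getElem?_drop] using this
      have hcd : cs.getD d ' ' = c := by simp [List.getD, h0]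
      have htake : cs.take (d + 1) = cs.take d ++ [c] := by
        rw [List.take_succ]; simp [h0]
      rw [nextNonDecLoop]
      simp only [hd, dif_pos, Bool.false_eq_true, if_false]
      rw [hcd, hprev]
      simp only [firstDecIdx]
      by_cases hlt : c < prev
      · rw [if_pos hlt, if_pos hlt, loop_update_true]
        show List.take d cs ++ [prev] ++ List.replicate (cs.length - (d + 1)) prev =
          List.take d cs ++ List.replicate (cs.length - d) (cs.getD (d - 1) ' ')
        rw [hprev]
        have hlen : cs.length - d = (cs.length - (d + 1)) + 1 := by omega
        rw [hlen, List.replicate_succ]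
        simp
      · rw [if_neg hlt, if_neg hlt]
        have hdrop' : cs.drop (d + 1) = r' := by
          have := congrArg (fun l => l.drop 1) hdrop
          simpa [List.drop_drop] using this
        have hprev' : cs.getD ((d + 1) - 1) ' ' = c := by simpa using hcd
        have := ih (d + 1) c (by omega) hdrop' hprev'
        rw [← htake]
        exact this

theorem mk_toList (s : String) : String.mk s.toList = s := String.ofList_toList

-- ===== VERDICT =====
theorem nextNonDec_spec : Claim_equal_nextNonDec := by
  intro s _ hpre
  unfold Spec_nextNonDec nextNonDec nextNonDec_alt
  cases hcs : s.toList with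
  | nil =>
      exact absurd (by cases s; simp_all) hpre
  | cons c0 t =>
      simp only
      have h2 : s.toList.drop 1 = t := by rw [hcs]; rfl
      have h3 : s.toList.getD (1 - 1) ' ' = c0 := by rw [hcs]; rfl
      have hmain := loop_main s.toList ' ' t 1 c0 (le_refl 1) h2 h3
      have h1 : s.toList.take 1 = [c0] := by rw [hcs]; rfl
      rw [h1, hcs] at hmain
      rw [hmain]
      cases hfd : firstDecIdx c0 t 1 with
      | none => simp [← hcs, mk_toList]
      | some i => simp
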